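-- pv_equiv track=rewrite | github.com/loupdaniel/cs-111 | past_assignments/CLeeBWang_cs111_project5/CLeeBWang_cs111_project5.py | nextORF
-- ===== SOURCE A (Python) =====
-- def readingFrames(dna, frameNum):
--     """A function that returns all the codons based on specific reading frame in the order that the codons appear
--
--     Parameters:
--         dna: a DNA string
--         frameNum: the number 0, 1, or 2 counting the number of nucleotides ignore
--         before starting to group nucleotides into codons for a reading frame.
--
--     Returns:
--         codons: a list of length-3 strings representing all the codons
--         of the chosen reading frame in the order that the codons appear
--     """
--
--     if len(str(dna)) == 0:
--         return "DNA string is empty!"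
--
--
--     codons= []
--     numCodons= (len(dna)-frameNum)//3
--
--     x=frameNum
--     for i in range(numCodons):
--
--         codon = dna [x:x+3]
--         codons.append(codon.lower())
--
--         x=x+3
--
--     return codons
--
-- def nextORF(dna):
--     """A function that returns the index of the “a” in the start codon and
--     the index of the nucleotide just after the stop codon to find the complete open reading frame
--
--     Parameters:
--         dna: a DNA string
--
--     Returns:
--         x: The index of the “a” in the start codon. Returns None if no ORFs are found.
--         y: The index of the nucleotide just after the stop codon. Returns None if no ORFs are found.
--     """
--
--     if len(str(dna)) == 0:
--         return "DNA string is empty!"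
--
--
--     temp = []
--     startCodon = "atg"
--     stopCodon = ["taa", "tag", "tga"]
--
--
--     for i in range(3):
--         temp = readingFrames(dna, i)
--
--         index = 0
--
--         xList = []
--         yList = []
--
--         while index < len(temp):
--             if temp[index] == startCodon:
--                 xList.append((index * 3) + i)
--
--                 for index2 in range(index + 1, len(temp)):
--                     if temp[index2] in stopCodon:
--                         yList.append((index2 * 3) + i + 3)
--
--                         #return xList[0], yList[0]
--
--                 if len(yList) != 0:
--                     return xList[0], yList[0]
--                 else:
--                     break
--
--             index += 1
--
--     return None, None
-- ===== SOURCE B (Python) =====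
-- def nextORF(dna):
--     # One simultaneous left-to-right pass over every codon position, tracking all
--     # three reading frames at once in a per-frame state table, then picking the
--     # lowest-numbered frame that completed an ORF.
--     stops = ('taa', 'tag', 'tga')
--     state = {0: (None, None), 1: (None, None), 2: (None, None)}
--     for j in range(len(dna) - 2):
--         f = j % 3
--         s, r = state[f]
--         if r is not None:
--             continue
--         c = dna[j:j+3].lower()
--         if s is None:
--             if c == 'atg':
--                 state[f] = (j, None)
--         elif c in stops:
--             state[f] = (s, (s, j + 3))
--     for f in range(3):
--         r = state[f][1]
--         if r is not None:
--             return r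
--     return None, None
-- ===== Notes on version B (the rewrite author's own statement) =====
-- stated objective: alternative
-- what changed: A scans the three reading frames one after another (building each frame's codon list via a helper, then a while loop with a nested stop-collecting scan); B makes a single left-to-right pass over all codon positions, updating a per-frame state table (first start seen, completed ORF) keyed by j % 3, and picks the lowest completed frame at the end.
-- outside the precondition, e.g. on nextORF(''): A returns 'DNA string is empty!', B returns (None, None)
import Mathlib
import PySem

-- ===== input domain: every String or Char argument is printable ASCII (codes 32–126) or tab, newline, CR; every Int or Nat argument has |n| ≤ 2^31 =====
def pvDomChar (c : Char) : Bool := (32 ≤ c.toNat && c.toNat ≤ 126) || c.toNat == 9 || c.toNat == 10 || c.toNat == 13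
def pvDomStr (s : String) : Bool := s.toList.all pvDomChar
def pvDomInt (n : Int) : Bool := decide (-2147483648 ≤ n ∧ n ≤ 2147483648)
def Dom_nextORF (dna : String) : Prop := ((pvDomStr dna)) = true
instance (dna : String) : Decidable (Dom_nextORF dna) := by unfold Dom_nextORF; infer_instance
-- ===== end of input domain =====

-- B replaces A's three sequential frame scans (helper-built codon list + while loop with a nested
-- stop-collecting scan) by ONE simultaneous left-to-right pass over all codon positions, keeping a
-- per-frame state table keyed by j % 3 and picking the lowest completed frame at the end: same
-- values, a genuinely different traversal (alternative decomposition, not claimed faster).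


-- ===== PORT A =====
-- codons as lists of chars; "atg" / stop codons as literal char lists (shared data literals)
def pvATG : List Char := ['a', 't', 'g']
def pvStops : List (List Char) := [['t', 'a', 'a'], ['t', 'a', 'g'], ['t', 'g', 'a']]

-- readingFrames(dna, frameNum); its empty-string branch (returns a *string*) is unreachable from
-- nextORF's guarded call sites and excluded by Pre_, so only the codon-building loop is ported.
def readingFramesA (dna : List Char) (frameNum : Int) : List (List Char) :=
  let numCodons := PySem.Int.floordiv ((dna.length : Int) - frameNum) 3
  ((PySem.List.pyRange 0 numCodons 1).foldl
    (fun (st : List (List Char) × Int) _ =>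
      (st.1 ++ [PySem.Chars.lower (PySem.Chars.slice dna (some st.2) (some (st.2 + 3)))], st.2 + 3))
    ([], frameNum)).1

-- the inner 'for index2 in range(index+1, len(temp))' loop collecting yList
def yListA (temp : List (List Char)) (i : Int) (index : Nat) : List Int :=
  (PySem.List.pyRange ((index : Int) + 1) (temp.length : Int) 1).foldl
    (fun ys i2 => if pvStops.contains (PySem.List.pyGetD temp i2 []) then ys ++ [i2 * 3 + i + 3] else ys)
    []

-- the 'while index < len(temp)' loop of one frame; 'none' = the frame's break / loop exhaustion.
-- structural fuel (= number of remaining indices) only makes the same loop total for the kernel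
def whileAFuel (temp : List (List Char)) (i : Int) : Nat → Nat → Option (Option Int × Option Int)
  | 0, _ => none
  | fuel + 1, index =>
    if h : index < temp.length then
      if temp[index] == pvATG then
        match yListA temp i index with
        | [] => none                                   -- yList empty: break
        | y :: _ => some (some ((index : Int) * 3 + i), some y)   -- return xList[0], yList[0]
      else whileAFuel temp i fuel (index + 1)
    else none

def whileA (temp : List (List Char)) (i : Int) (index : Nat) : Option (Option Int × Option Int) :=
  whileAFuel temp i (temp.length - index) index

-- 'for i in range(3)' with early return
def tryFramesA (dna : List Char) : List Int → Option Int × Option Int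
  | [] => (none, none)
  | i :: rest =>
    match whileA (readingFramesA dna i) i 0 with
    | some r => r
    | none => tryFramesA dna rest

def nextORF (dna : String) : Option Int × Option Int :=
  -- on empty input A returns the string "DNA string is empty!", not a pair: excluded by Pre_
  if dna.toList = [] then (none, none)
  else tryFramesA dna.toList [0, 1, 2]

-- ===== PORT B =====
-- one step of Source B's single pass: j is a codon position, f = j % 3 its frame; the dict maps each
-- frame to (first start position seen, completed ORF)
def stepB (dna : List Char) (st : PySem.Dict Int (Option Int × Option (Int × Int))) (j : Int) :
    PySem.Dict Int (Option Int × Option (Int × Int)) :=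
  let f := PySem.Int.mod j 3
  let sr := st.getD f (none, none)
  match sr.2 with
  | some _ => st                                      -- frame already completed: continue
  | none =>
    let c := PySem.Chars.lower (PySem.Chars.slice dna (some j) (some (j + 3)))
    match sr.1 with
    | none => if c == pvATG then st.insert f (some j, none) else st
    | some s => if pvStops.contains c then st.insert f (some s, some (s, j + 3)) else st

-- state = {0: (None, None), 1: (None, None), 2: (None, None)}
def initB : PySem.Dict Int (Option Int × Option (Int × Int)) :=
  PySem.Dict.ofList [(0, (none, none)), (1, (none, none)), (2, (none, none))]

-- 'for f in range(3): if state[f][1] is not None: return it'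
def pickB (st : PySem.Dict Int (Option Int × Option (Int × Int))) : List Int → Option Int × Option Int
  | [] => (none, none)
  | f :: rest =>
    match (st.getD f (none, none)).2 with
    | some r => (some r.1, some r.2)
    | none => pickB st rest

def nextORF_alt (dna : String) : Option Int × Option Int :=
  let dl := dna.toList
  pickB ((PySem.List.pyRange 0 ((dl.length : Int) - 2) 1).foldl (stepB dl) initB) [0, 1, 2]

-- ===== PRECONDITION & SPEC =====
-- Pre_ excludes only the empty string, on which A returns the string "DNA string is empty!"
-- instead of a pair of indices (a value outside the declared return type).
def Pre_nextORF (dna : String) : Prop := dna.toList ≠ []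
instance (dna : String) : Decidable (Pre_nextORF dna) := by unfold Pre_nextORF; infer_instance
def pvWitness_nextORF : String := "catgtaag"

def Spec_nextORF (dna : String) (out : Option Int × Option Int) : Prop := out = nextORF_alt dna
instance (dna : String) (out : Option Int × Option Int) : Decidable (Spec_nextORF dna out) := by unfold Spec_nextORF; infer_instance

-- ===== CLAIM (what is proved, stated in full; the proofs are below) =====
def Claim_equal_nextORF : Prop := ∀ (dna : String), Dom_nextORF dna → Pre_nextORF dna → Spec_nextORF dna (nextORF dna)

-- ===== LEMMAS AND PROOFS =====

-- the codon at frame position j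
def pvCodon (dna : List Char) (j : Int) : List Char :=
  PySem.Chars.lower (PySem.Chars.slice dna (some j) (some (j + 3)))

-- common shape both frame computations are reduced to: first start codon index k, then the first
-- stop codon index after it, with A's value arithmetic
def pvFrameSpec (cnt : Nat) (g : Nat → List Char) (i : Int) : Option (Int × Int) :=
  match ((List.range cnt).filter (fun k => g k == pvATG)).head? with
  | none => none
  | some k =>
    match (((List.range cnt).drop (k + 1)).filter (fun m => pvStops.contains (g m))).head? with
    | none => none
    | some m => some ((k : Int) * 3 + i, (m : Int) * 3 + i + 3)

lemma pv_fold_build {α : Type} (l : List Int) (f : Int → α) (acc : List α) (x : Int) :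
    (l.foldl (fun (st : List α × Int) _ => (st.1 ++ [f st.2], st.2 + 3)) (acc, x)).1
      = acc ++ (List.range l.length).map (fun (k : Nat) => f (x + 3 * (k : Int))) := by
  induction l generalizing acc x with
  | nil => simp
  | cons a t ih =>
    simp only [List.foldl_cons, List.length_cons, ih, List.range_succ_eq_map, List.map_cons,
      List.map_map]
    have h : ((fun (k : Nat) => f (x + 3 * (k : Int))) ∘ Nat.succ)
        = fun (k : Nat) => f ((x + 3) + 3 * (k : Int)) := by
      funext k
      simp only [Function.comp_apply, Nat.succ_eq_add_one]
      congr 1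
      push_cast
      ring
    rw [h]
    simp only [List.append_assoc, List.singleton_append]
    norm_num

-- A's readingFrames builds exactly the codons at positions i, i+3, …
lemma readingFramesA_eq (dna : List Char) (i : Int) :
    readingFramesA dna i
      = (List.range (PySem.Int.floordiv ((dna.length : Int) - i) 3).toNat).map
          (fun (k : Nat) => pvCodon dna (i + 3 * (k : Int))) := by
  unfold readingFramesA
  rw [pv_fold_build _ (fun j => PySem.Chars.lower (PySem.Chars.slice dna (some j) (some (j + 3)))) [] i]
  rw [PySem.List.length_pyRange_one]
  simp [pvCodon]

-- a range splits at any point into an initial range and a range'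
lemma pv_range_split (k cnt : Nat) (hk : k ≤ cnt) :
    List.range cnt = List.range k ++ List.range' k (cnt - k) := by
  rw [List.range_eq_range', List.range_eq_range' (n := k)]
  have h := List.range'_append (s := 0) (m := k) (n := cnt - k) (step := 1)
  simp only [one_mul, zero_add] at h
  rw [h, Nat.add_sub_cancel' hk]

lemma pv_drop_range (k cnt : Nat) (hk : k ≤ cnt) :
    (List.range cnt).drop k = List.range' k (cnt - k) := by
  rw [pv_range_split k cnt hk, List.drop_left' (by rw [List.length_range])]

-- yList of A is the stop positions strictly after index, with A's value attached
lemma yListA_eq (cnt : Nat) (g : Nat → List Char) (i : Int) (index : Nat) (h : index < cnt) :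
    yListA ((List.range cnt).map g) i index
      = (((List.range cnt).drop (index + 1)).filter (fun m => pvStops.contains (g m))).map
          (fun (m : Nat) => (m : Int) * 3 + i + 3) := by
  unfold yListA
  rw [PySem.List.foldl_append_if]
  simp only [List.nil_append, List.length_map, List.length_range]
  rw [PySem.List.pyRange_one]
  have hlen : ((cnt : Int) - ((index : Int) + 1)).toNat = cnt - (index + 1) := by omega
  rw [hlen, List.filter_map, List.map_map,
    pv_drop_range (index + 1) cnt (by omega), List.range'_eq_map_range,
    List.filter_map, List.map_map]
  have hfil : List.filter
        ((fun i2 => pvStops.contains (PySem.List.pyGetD ((List.range cnt).map g) i2 []))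
          ∘ fun (k : Nat) => (index : Int) + 1 + (k : Int)) (List.range (cnt - (index + 1)))
      = List.filter ((fun m => pvStops.contains (g m)) ∘ fun x => index + 1 + x)
          (List.range (cnt - (index + 1))) := by
    apply List.filter_congr
    intro k hk
    have hk' : index + 1 + k < cnt := by
      have := List.mem_range.mp hk; omega
    simp only [Function.comp_apply]
    have hcast : (index : Int) + 1 + (k : Int) = ((index + 1 + k : Nat) : Int) := by
      push_cast; ring
    rw [hcast, PySem.List.pyGetD_natCast,
      PySem.List.getD_map_range g cnt (index + 1 + k) [] hk']
  rw [hfil]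
  apply List.map_congr_left
  intro k hk
  simp only [Function.comp_apply]
  push_cast
  ring

-- A's while loop computes pvFrameSpec (started at any index)
lemma whileA_eq_from (cnt : Nat) (g : Nat → List Char) (i : Int) (index : Nat) :
    whileA ((List.range cnt).map g) i index
      = (match (((List.range cnt).drop index).filter (fun k => g k == pvATG)).head? with
        | none => none
        | some k =>
          match (((List.range cnt).drop (k + 1)).filter (fun m => pvStops.contains (g m))).head? with
          | none => none
          | some m => some (some ((k : Int) * 3 + i), some ((m : Int) * 3 + i + 3))) := by
  have main : ∀ fuel index, cnt - index = fuel →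
      whileAFuel ((List.range cnt).map g) i fuel index
        = (match (((List.range cnt).drop index).filter (fun k => g k == pvATG)).head? with
          | none => none
          | some k =>
            match (((List.range cnt).drop (k + 1)).filter (fun m => pvStops.contains (g m))).head? with
            | none => none
            | some m => some (some ((k : Int) * 3 + i), some ((m : Int) * 3 + i + 3))) := by
    intro fuel
    induction fuel with
    | zero =>
      intro index hf
      rw [whileAFuel]
      rw [List.drop_eq_nil_of_le (by rw [List.length_range]; omega)]
      simp
    | succ f ih =>
      intro index hf
      have hidx : index < cnt := by omega
      have hd : (List.range cnt).drop index = index :: (List.range cnt).drop (index + 1) := by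
        rw [List.drop_eq_getElem_cons (by rw [List.length_range]; exact hidx)]
        rw [List.getElem_range]
      rw [whileAFuel]
      simp only [List.length_map, List.length_range]
      rw [dif_pos hidx]
      simp only [List.getElem_map, List.getElem_range]
      by_cases hs : (g index == pvATG) = true
      · rw [if_pos hs, yListA_eq cnt g i index hidx, hd]
        simp only [List.filter_cons, hs, if_true, List.head?_cons]
        cases hys : ((List.range cnt).drop (index + 1)).filter (fun m => pvStops.contains (g m)) with
        | nil => simp
        | cons m tl => simp
      · rw [if_neg hs, ih (index + 1) (by omega), hd]
        rw [List.filter_cons, if_neg hs]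
  have hlen : ((List.range cnt).map g).length - index = cnt - index := by
    rw [List.length_map, List.length_range]
  rw [whileA, hlen]
  exact main (cnt - index) index rfl

lemma whileA_eq (cnt : Nat) (g : Nat → List Char) (i : Int) :
    whileA ((List.range cnt).map g) i 0
      = (pvFrameSpec cnt g i).map (fun p => (some p.1, some p.2)) := by
  rw [whileA_eq_from cnt g i 0]
  simp only [List.drop_zero]
  unfold pvFrameSpec
  cases hks : ((List.range cnt).filter (fun k => g k == pvATG)).head? with
  | none => simp
  | some k =>
    cases hms : (((List.range cnt).drop (k + 1)).filter (fun m => pvStops.contains (g m))).head? with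
    | none => simp only []; rw [hms]; rfl
    | some m => simp only []; rw [hms]; rfl

-- ===== B side =====

-- one frame's transitions, extracted from stepB (what stepB does to the entry it touches)
def pstepB (dna : List Char) (p : Option Int × Option (Int × Int)) (j : Int) :
    Option Int × Option (Int × Int) :=
  match p.2 with
  | some _ => p
  | none =>
    let c := PySem.Chars.lower (PySem.Chars.slice dna (some j) (some (j + 3)))
    match p.1 with
    | none => if c == pvATG then (some j, none) else p
    | some s => if pvStops.contains c then (some s, some (s, j + 3)) else p

-- stepB touches exactly the entry of frame j % 3, applying pstepB to it
lemma stepB_getD (dna : List Char) (st : PySem.Dict Int (Option Int × Option (Int × Int))) (j f : Int) :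
    (stepB dna st j).getD f (none, none)
      = if f = PySem.Int.mod j 3
        then pstepB dna (st.getD (PySem.Int.mod j 3) (none, none)) j
        else st.getD f (none, none) := by
  unfold stepB pstepB
  cases h2 : (st.getD (PySem.Int.mod j 3) (none, none)).2 with
  | some r =>
    simp only [h2]
    split_ifs with hf
    · subst hf; rfl
    · rfl
  | none =>
    cases h1 : (st.getD (PySem.Int.mod j 3) (none, none)).1 with
    | none =>
      simp only [h1, h2]
      cases hc : (PySem.Chars.lower (PySem.Chars.slice dna (some j) (some (j + 3))) == pvATG) with
      | true => simp [PySem.Dict.getD_insert]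
      | false =>
        simp only [Bool.false_eq_true, if_false]
        split_ifs with hf
        · subst hf; rfl
        · rfl
    | some s =>
      simp only [h1, h2]
      cases hc : pvStops.contains (PySem.Chars.lower (PySem.Chars.slice dna (some j) (some (j + 3)))) with
      | true => simp [PySem.Dict.getD_insert]
      | false =>
        simp only [Bool.false_eq_true, if_false]
        split_ifs with hf
        · subst hf; rfl
        · rfl

-- the interleaved pass, projected to one frame, is the per-frame fold over that frame's positions
lemma foldB_partition (dna : List Char) (l : List Int)
    (st : PySem.Dict Int (Option Int × Option (Int × Int))) (f : Int) :
    (l.foldl (stepB dna) st).getD f (none, none)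
      = (l.filter (fun j => PySem.Int.mod j 3 == f)).foldl (pstepB dna) (st.getD f (none, none)) := by
  induction l generalizing st with
  | nil => rfl
  | cons j t ih =>
    simp only [List.foldl_cons, List.filter_cons]
    by_cases hf : (PySem.Int.mod j 3 == f) = true
    · rw [if_pos hf, List.foldl_cons, ih, stepB_getD]
      rw [if_pos (beq_iff_eq.mp hf).symm, (beq_iff_eq.mp hf)]
    · rw [if_neg hf, ih, stepB_getD,
        if_neg (fun h => hf (beq_iff_eq.mpr h.symm))]

-- a completed frame never changes again
lemma pstepB_keeps (dna : List Char) (l : List Int) (s : Option Int) (r : Int × Int) :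
    l.foldl (pstepB dna) (s, some r) = (s, some r) := by
  induction l with
  | nil => rfl
  | cons j t ih => simpa [pstepB] using ih

-- after the first start s, the frame completes at the first stop position of the rest of its list
lemma foldB_some (dna : List Char) (i s : Int) (l : List Nat) :
    ((l.map (fun (k : Nat) => i + 3 * (k : Int))).foldl (pstepB dna) (some s, none))
      = match (l.filter (fun (m : Nat) => pvStops.contains (pvCodon dna (i + 3 * (m : Int))))).head? with
        | none => (some s, none)
        | some m => (some s, some (s, i + 3 * (m : Int) + 3)) := by
  induction l with
  | nil => rfl
  | cons k t ih =>
    simp only [List.map_cons, List.foldl_cons, List.filter_cons]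
    by_cases hc : pvStops.contains (pvCodon dna (i + 3 * (k : Int))) = true
    · have hstep : pstepB dna (some s, none) (i + 3 * (k : Int))
          = (some s, some (s, i + 3 * (k : Int) + 3)) := by
        simp [pstepB, pvCodon] at hc ⊢
        simp [hc]
      rw [hstep, pstepB_keeps, if_pos hc, List.head?_cons]
    · have hstep : pstepB dna (some s, none) (i + 3 * (k : Int)) = (some s, none) := by
        simp [pstepB, pvCodon] at hc ⊢
        simp [hc]
      rw [hstep, ih, if_neg hc]

-- from the empty state, the frame records the first start and then the first later stop
lemma foldB_none (dna : List Char) (i : Int) (l : List Nat) :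
    ((l.map (fun (k : Nat) => i + 3 * (k : Int))).foldl (pstepB dna) (none, none))
      = match l.dropWhile (fun (k : Nat) => !(pvCodon dna (i + 3 * (k : Int)) == pvATG)) with
        | [] => (none, none)
        | k :: rest =>
          match (rest.filter (fun (m : Nat) => pvStops.contains (pvCodon dna (i + 3 * (m : Int))))).head? with
          | none => (some (i + 3 * (k : Int)), none)
          | some m => (some (i + 3 * (k : Int)), some (i + 3 * (k : Int), i + 3 * (m : Int) + 3)) := by
  induction l with
  | nil => rfl
  | cons k t ih =>
    simp only [List.map_cons, List.foldl_cons, List.dropWhile_cons]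
    by_cases hs : (pvCodon dna (i + 3 * (k : Int)) == pvATG) = true
    · have hstep : pstepB dna (none, none) (i + 3 * (k : Int)) = (some (i + 3 * (k : Int)), none) := by
        simp [pvCodon] at hs
        simp [pstepB, hs]
      rw [hstep, foldB_some]
      simp [hs]
    · have hstep : pstepB dna (none, none) (i + 3 * (k : Int)) = (none, none) := by
        simp [pvCodon] at hs
        simp [pstepB, hs]
      rw [hstep, ih]
      simp [hs]

-- dropWhile on a range: an empty result means no element satisfies p …
lemma pv_dropWhile_range_nil (p : Nat → Bool) (cnt : Nat)
    (h : (List.range cnt).dropWhile (fun a => !p a) = []) :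
    (List.range cnt).filter p = [] := by
  rw [List.filter_eq_nil_iff]
  intro a ha
  have := List.dropWhile_eq_nil_iff.mp h a ha
  simpa using this

-- … and a cons result gives the first p-element and the untouched tail of the range
lemma pv_dropWhile_range_cons (p : Nat → Bool) (cnt k : Nat) (rest : List Nat)
    (h : (List.range cnt).dropWhile (fun a => !p a) = k :: rest) :
    ((List.range cnt).filter p).head? = some k ∧ rest = (List.range cnt).drop (k + 1) := by
  have hpk : p k = true := by
    have := List.head?_dropWhile_not (fun a => !p a) (List.range cnt)
    rw [h] at this
    simpa using this
  have hsplit : (List.range cnt).takeWhile (fun a => !p a) ++ k :: rest = List.range cnt := by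
    rw [← h]; exact List.takeWhile_append_dropWhile
  have hlt : ((List.range cnt).takeWhile (fun a => !p a)).length < cnt := by
    have := congrArg List.length hsplit
    simp at this
    omega
  have hlen : ((List.range cnt).takeWhile (fun a => !p a)).length = k := by
    have h1 : ((List.range cnt).takeWhile (fun a => !p a) ++ k :: rest)[((List.range cnt).takeWhile (fun a => !p a)).length]?
        = some k := by
      rw [List.getElem?_append_right (le_refl _), Nat.sub_self]
      rfl
    rw [hsplit, List.getElem?_range hlt] at h1
    exact Option.some_inj.mp h1
  constructor
  · rw [← hsplit, List.filter_append]
    have htw : ((List.range cnt).takeWhile (fun a => !p a)).filter p = [] := by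
      rw [List.filter_eq_nil_iff]
      intro a ha
      have := List.mem_takeWhile_imp ha
      simpa using this
    rw [htw, List.nil_append, List.filter_cons, if_pos hpk, List.head?_cons]
  · rw [← hsplit]
    have : (List.range cnt).takeWhile (fun a => !p a) ++ k :: rest
        = ((List.range cnt).takeWhile (fun a => !p a) ++ [k]) ++ rest := by simp
    rw [this, List.drop_left' (by simp [hlen])]

-- the per-frame fold equals the common frame spec
lemma foldB_spec (dna : List Char) (cnt : Nat) (i : Int) :
    (((List.range cnt).map (fun (k : Nat) => i + 3 * (k : Int))).foldl (pstepB dna) (none, none)).2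
      = pvFrameSpec cnt (fun (k : Nat) => pvCodon dna (i + 3 * (k : Int))) i := by
  rw [foldB_none]
  unfold pvFrameSpec
  cases hdw : (List.range cnt).dropWhile (fun (k : Nat) => !(pvCodon dna (i + 3 * (k : Int)) == pvATG)) with
  | nil =>
    rw [pv_dropWhile_range_nil (fun (k : Nat) => pvCodon dna (i + 3 * (k : Int)) == pvATG) cnt hdw]
    rfl
  | cons k rest =>
    obtain ⟨hhead, hrest⟩ :=
      pv_dropWhile_range_cons (fun (k : Nat) => pvCodon dna (i + 3 * (k : Int)) == pvATG) cnt k rest hdw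
    rw [hhead]
    subst hrest
    cases hms : (((List.range cnt).drop (k + 1)).filter
        (fun (m : Nat) => pvStops.contains (pvCodon dna (i + 3 * (m : Int))))).head? with
    | none => simp only [hms]
    | some m =>
      simp only [hms]
      refine congrArg some ?_
      simp only [Prod.mk.injEq]
      constructor <;> ring

-- the dict starts with every frame at (None, None) — which is also the lookup default
lemma initB_getD (f : Int) : initB.getD f (none, none)
    = ((none : Option Int), (none : Option (Int × Int))) := by
  unfold initB
  simp [PySem.Dict.ofList, PySem.Dict.update, PySem.Dict.getD_eq_get?_getD, PySem.Dict.get?_insert]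
  split_ifs <;> rfl

-- frame positions of frame fN inside range M, Nat level
lemma pv_filter_mod3 (fN : Nat) (hf : fN < 3) : ∀ (M : Nat),
    (List.range M).filter (fun k => k % 3 == fN)
      = (List.range ((M + 2 - fN) / 3)).map (fun k => fN + 3 * k) := by
  intro M
  induction M with
  | zero =>
    have : (2 - fN) / 3 = 0 := by omega
    simp [this]
  | succ M ih =>
    rw [List.range_succ, List.filter_append, ih]
    by_cases hM : M % 3 = fN
    · have hc : (M + 1 + 2 - fN) / 3 = (M + 2 - fN) / 3 + 1 := by omega
      have hv : fN + 3 * ((M + 2 - fN) / 3) = M := by omega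
      rw [hc, List.range_succ, List.map_append]
      simp [hM, hv]
    · have hc : (M + 1 + 2 - fN) / 3 = (M + 2 - fN) / 3 := by omega
      rw [hc]
      simp [hM]

-- frame fN's codon positions among all positions 0 … n-3, as Ints
lemma pv_filter_frames (n : Nat) (fN : Nat) (hf : fN < 3) :
    (PySem.List.pyRange 0 ((n : Int) - 2) 1).filter (fun j => PySem.Int.mod j 3 == (fN : Int))
      = (List.range (PySem.Int.floordiv ((n : Int) - (fN : Int)) 3).toNat).map
          (fun (k : Nat) => (fN : Int) + 3 * (k : Int)) := by
  rw [PySem.List.pyRange_one]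
  rw [List.filter_map]
  have hpred : ((fun j => PySem.Int.mod j 3 == (fN : Int)) ∘ fun (k : Nat) => (0 : Int) + (k : Int))
      = fun (k : Nat) => k % 3 == fN := by
    funext k
    simp only [Function.comp_apply, zero_add]
    rw [PySem.Int.mod_eq_emod_of_pos (by norm_num)]
    have h1 : ((k : Int) % 3) = ((k % 3 : Nat) : Int) := by omega
    rw [h1]
    by_cases h : k % 3 = fN
    · simp [h]
    · have h2 : ¬ ((k : Int) % 3 = ((fN : Nat) : Int)) := by omega
      simp [h, h2]
  rw [hpred, pv_filter_mod3 fN hf, List.map_map]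
  have hc : ((((n : Int) - 2 - 0).toNat + 2 - fN) / 3)
      = (PySem.Int.floordiv ((n : Int) - (fN : Int)) 3).toNat := by
    rw [PySem.Int.floordiv_eq_ediv_of_pos (by norm_num)]
    omega
  rw [hc]
  apply List.map_congr_left
  intro k hk
  simp only [Function.comp_apply]
  push_cast
  ring

-- one frame of the interleaved pass equals the common frame spec
lemma frameB_val (dna : List Char) (fN : Nat) (hf : fN < 3) :
    (((PySem.List.pyRange 0 ((dna.length : Int) - 2) 1).foldl (stepB dna) initB).getD (fN : Int)
        (none, none)).2
      = pvFrameSpec (PySem.Int.floordiv ((dna.length : Int) - (fN : Int)) 3).toNat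
          (fun (k : Nat) => pvCodon dna ((fN : Int) + 3 * (k : Int))) (fN : Int) := by
  rw [foldB_partition, initB_getD, pv_filter_frames dna.length fN hf, foldB_spec]

-- picking the first completed frame commutes with the (some, some) repackaging
lemma pv_pick_match (x0 x1 x2 : Option (Int × Int)) :
    (match (x0.map (fun p => (some p.1, some p.2)) : Option (Option Int × Option Int)) with
     | some r => r
     | none =>
       match (x1.map (fun p => (some p.1, some p.2)) : Option (Option Int × Option Int)) with
       | some r => r
       | none =>
         match (x2.map (fun p => (some p.1, some p.2)) : Option (Option Int × Option Int)) with
         | some r => r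
         | none => ((none : Option Int), (none : Option Int)))
      = (match x0 with
         | some r => (some r.1, some r.2)
         | none =>
           match x1 with
           | some r => (some r.1, some r.2)
           | none =>
             match x2 with
             | some r => (some r.1, some r.2)
             | none => ((none : Option Int), (none : Option Int))) := by
  cases x0 <;> cases x1 <;> cases x2 <;> simp

-- ===== VERDICT (by name: the statement is the Claim_ definition above) =====
theorem nextORF_spec : Claim_equal_nextORF := by
  intro dna _ hpre
  show nextORF dna = nextORF_alt dna
  unfold nextORF nextORF_alt
  rw [if_neg hpre]
  have hA : ∀ (i : Int), whileA (readingFramesA dna.toList i) i 0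
      = (pvFrameSpec (PySem.Int.floordiv ((dna.toList.length : Int) - i) 3).toNat
          (fun (k : Nat) => pvCodon dna.toList (i + 3 * (k : Int))) i).map
          (fun p => (some p.1, some p.2)) := by
    intro i
    rw [readingFramesA_eq]
    exact whileA_eq _ _ i
  have hB0 := frameB_val dna.toList 0 (by norm_num)
  have hB1 := frameB_val dna.toList 1 (by norm_num)
  have hB2 := frameB_val dna.toList 2 (by norm_num)
  simp only [Nat.cast_zero, Nat.cast_one, Nat.cast_ofNat] at hB0 hB1 hB2
  simp only [tryFramesA, pickB, hA 0, hA 1, hA 2, hB0, hB1, hB2]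
  exact pv_pick_match _ _ _
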